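-- pv_equiv track=rewrite | github.com/davidcantidio/test-tdd-project | syntax_error_fixer.py | _remove_duplicate_imports
-- ===== SOURCE A (Python) =====
-- def _remove_duplicate_imports(content: str) -> str:
--     """Remove duplicate imports."""
--     lines = content.split('\n')
--     seen_imports = set()
--     clean_lines = []
--
--     for line in lines:
--         if (line.strip().startswith('import ') or line.strip().startswith('from ')):
--             if line.strip() in seen_imports:
--                 continue  # Skip duplicate
--             seen_imports.add(line.strip())
--
--         clean_lines.append(line)
--
--     return '\n'.join(clean_lines)
-- ===== SOURCE B (Python) =====
-- def _remove_duplicate_imports(content: str) -> str: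
--     """Remove duplicate imports: build a first-occurrence table, then filter."""
--     lines = content.split('\n')
--     first = {}
--     for i, line in enumerate(lines):
--         key = line.strip()
--         if (key.startswith('import ') or key.startswith('from ')) and key not in first:
--             first[key] = i
--     kept = [line for i, line in enumerate(lines)
--             if not (line.strip().startswith('import ')
--                     or line.strip().startswith('from '))
--             or first.get(line.strip()) == i]
--     return '\n'.join(kept)
-- ===== Notes on version B (the rewrite author's own statement) =====
-- stated objective: alternative
-- what changed: Replaces A's emit-while-scanning skip logic (a seen-set consulted and grown while emitting) by a two-pass build-table-then-filter decomposition: one pass records the first-occurrence index of each stripped import line in a dict, a second pass keeps a line iff it is not an import line or its index equals the recorded first occurrence.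
import Mathlib
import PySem

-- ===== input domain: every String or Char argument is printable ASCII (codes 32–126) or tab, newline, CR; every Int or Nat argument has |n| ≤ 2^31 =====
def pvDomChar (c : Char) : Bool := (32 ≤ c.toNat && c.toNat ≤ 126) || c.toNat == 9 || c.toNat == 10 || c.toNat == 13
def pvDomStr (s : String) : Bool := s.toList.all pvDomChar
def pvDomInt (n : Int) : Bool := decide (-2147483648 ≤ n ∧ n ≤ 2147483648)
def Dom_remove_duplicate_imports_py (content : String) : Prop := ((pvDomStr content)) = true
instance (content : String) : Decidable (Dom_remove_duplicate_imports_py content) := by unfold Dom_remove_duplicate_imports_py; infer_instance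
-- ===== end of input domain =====

-- B replaces A's emit-while-scanning skip logic by a first-occurrence-index table built in one
-- pass and a filter over the enumerated lines (objective: alternative decomposition, same cost).

-- ===== PORT A =====
-- A's duplicated per-line test: line.strip().startswith('import ') or line.strip().startswith('from ')
def rdiIsImpA (line : List Char) : Bool :=
  PySem.Chars.startswith (PySem.Chars.strip line) "import ".toList ||
  PySem.Chars.startswith (PySem.Chars.strip line) "from ".toList

def remove_duplicate_imports_py (content : String) : String :=
  let lines := PySem.Chars.splitOn content.toList ['\n']
  let st := lines.foldl
    (fun (st : PySem.Set (List Char) × List (List Char)) line =>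
      if rdiIsImpA line then
        if PySem.Set.contains st.1 (PySem.Chars.strip line) then st   -- continue: skip duplicate
        else (PySem.Set.add st.1 (PySem.Chars.strip line), st.2 ++ [line])
      else (st.1, st.2 ++ [line]))
    (PySem.Set.empty, [])
  String.ofList (PySem.Chars.join ['\n'] st.2)

-- ===== PORT B =====
-- B's test on the already-stripped key
def rdiIsImpKey (key : List Char) : Bool :=
  PySem.Chars.startswith key "import ".toList || PySem.Chars.startswith key "from ".toList

def remove_duplicate_imports_py_alt (content : String) : String :=
  let lines := PySem.Chars.splitOn content.toList ['\n']
  let first := (PySem.List.enumerate lines).foldl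
    (fun (d : PySem.Dict (List Char) Int) p =>
      let key := PySem.Chars.strip p.2
      if rdiIsImpKey key && !(d.contains key) then d.insert key p.1 else d)
    PySem.Dict.empty
  let kept := ((PySem.List.enumerate lines).filter
    (fun p =>
      !(rdiIsImpKey (PySem.Chars.strip p.2)) ||
      (first.get? (PySem.Chars.strip p.2) == some p.1))).map (·.2)
  String.ofList (PySem.Chars.join ['\n'] kept)

-- ===== PRECONDITION & SPEC =====
def Spec_remove_duplicate_imports_py (content : String) (out : String) : Prop := out = remove_duplicate_imports_py_alt content
instance (content : String) (out : String) : Decidable (Spec_remove_duplicate_imports_py content out) := by unfold Spec_remove_duplicate_imports_py; infer_instance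

-- ===== CLAIM (what is proved, stated in full; the proofs are below) =====
def Claim_equal_remove_duplicate_imports_py : Prop := ∀ (content : String), Dom_remove_duplicate_imports_py content → Spec_remove_duplicate_imports_py content (remove_duplicate_imports_py content)

-- ===== LEMMAS AND PROOFS =====

-- the two per-line tests agree
theorem rdiIsImp_eq (l : List Char) : rdiIsImpA l = rdiIsImpKey (PySem.Chars.strip l) := rfl

-- A's loop body
def rdiStepA (st : PySem.Set (List Char) × List (List Char)) (line : List Char) :
    PySem.Set (List Char) × List (List Char) :=
  if rdiIsImpA line then
    if PySem.Set.contains st.1 (PySem.Chars.strip line) then st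
    else (PySem.Set.add st.1 (PySem.Chars.strip line), st.2 ++ [line])
  else (st.1, st.2 ++ [line])

-- the clean-lines component of A's fold, accumulator factored out
def rdiKeepA (seen : PySem.Set (List Char)) : List (List Char) → List (List Char)
  | [] => []
  | l :: ls =>
    if rdiIsImpA l then
      if PySem.Set.contains seen (PySem.Chars.strip l) then rdiKeepA seen ls
      else l :: rdiKeepA (PySem.Set.add seen (PySem.Chars.strip l)) ls
    else l :: rdiKeepA seen ls

theorem foldA_eq (ls : List (List Char)) :
    ∀ (seen : PySem.Set (List Char)) (acc : List (List Char)),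
    (ls.foldl rdiStepA (seen, acc)).2 = acc ++ rdiKeepA seen ls := by
  induction ls with
  | nil => intro seen acc; simp [rdiKeepA]
  | cons l ls ih =>
    intro seen acc
    simp only [List.foldl_cons, rdiKeepA, rdiStepA]
    by_cases h1 : rdiIsImpA l = true
    · rw [if_pos h1, if_pos h1]
      by_cases h2 : PySem.Set.contains seen (PySem.Chars.strip l) = true
      · rw [if_pos h2, if_pos h2, ih]
      · rw [if_neg h2, if_neg h2, ih]; simp
    · rw [if_neg h1, if_neg h1, ih]; simp

-- B's dict-building loop body
def rdiStepB (d : PySem.Dict (List Char) Int) (p : Int × List Char) : PySem.Dict (List Char) Int :=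
  if rdiIsImpKey (PySem.Chars.strip p.2) && !(d.contains (PySem.Chars.strip p.2)) then
    d.insert (PySem.Chars.strip p.2) p.1 else d

def rdiMatch (k : List Char) (p : Int × List Char) : Bool :=
  rdiIsImpKey (PySem.Chars.strip p.2) && (PySem.Chars.strip p.2 == k)

-- lookup in the dict built by B's loop = first matching pair's index
theorem dictB_get? (ps : List (Int × List Char)) :
    ∀ (d : PySem.Dict (List Char) Int) (k : List Char),
    (ps.foldl rdiStepB d).get? k =
      if d.contains k then d.get? k else (ps.find? (rdiMatch k)).map (·.1) := by
  induction ps with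
  | nil => intro d k; by_cases h : d.contains k = true <;> simp [h, PySem.Dict.get?_eq_none_iff_contains]
  | cons p ps ih =>
    intro d k
    simp only [List.foldl_cons]
    by_cases hm : rdiMatch k p = true
    · have hm2 : rdiIsImpKey (PySem.Chars.strip p.2) = true ∧ PySem.Chars.strip p.2 = k := by
        simpa [rdiMatch] using hm
      obtain ⟨himp, hk⟩ := hm2
      subst hk
      rw [List.find?_cons_of_pos hm]
      by_cases hc : d.contains (PySem.Chars.strip p.2) = true
      · have hstep : rdiStepB d p = d := by simp [rdiStepB, hc]
        rw [hstep, ih, if_pos hc, if_pos hc]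
      · have hstep : rdiStepB d p = d.insert (PySem.Chars.strip p.2) p.1 := by
          simp [rdiStepB, himp, hc]
        rw [hstep, ih]
        rw [if_pos (PySem.Dict.contains_insert_self _ _ _),
          if_neg (by simp [hc]), PySem.Dict.get?_insert_self]
        rfl
    · have hm' : rdiMatch k p = false := by simpa using hm
      rw [List.find?_cons_of_neg hm]
      by_cases hif : (rdiIsImpKey (PySem.Chars.strip p.2) && !(d.contains (PySem.Chars.strip p.2))) = true
      · have himp2 : rdiIsImpKey (PySem.Chars.strip p.2) = true := by
          have := hif; simp at this; exact this.1
        have hne : k ≠ PySem.Chars.strip p.2 := by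
          intro h; subst h
          simp [rdiMatch, himp2] at hm' 
        have hstep : rdiStepB d p = d.insert (PySem.Chars.strip p.2) p.1 := by
          simp only [rdiStepB, if_pos hif]
        rw [hstep, ih, PySem.Dict.contains_insert]
        have hkb : (k == PySem.Chars.strip p.2) = false := by simpa using hne
        rw [hkb, Bool.false_or]
        by_cases hck : d.contains k = true
        · rw [if_pos hck, if_pos hck, PySem.Dict.get?_insert_of_ne _ _ hne]
        · rw [if_neg hck, if_neg hck]
      · have hstep : rdiStepB d p = d := by
          simp only [rdiStepB]
          rw [if_neg hif]
        rw [hstep, ih]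

-- indices occurring in enumerate of a prefix are below its length
theorem enum_fst_lt {pref : List (List Char)} {p : Int × List Char}
    (h : p ∈ PySem.List.enumerate pref 0) : p.1 < (pref.length : Int) := by
  rcases (PySem.List.mem_enumerate_iff _ _ _).1 h with ⟨j, hj, rfl⟩
  simp; exact_mod_cast hj

-- the invariant carried through the scan: seen = stripped import keys of the prefix
def rdiInv (seen : PySem.Set (List Char)) (pref : List (List Char)) : Prop :=
  ∀ k, PySem.Set.contains seen k = true ↔
    ((PySem.List.enumerate pref 0).find? (rdiMatch k)).isSome = true

theorem inv_snoc (seen : PySem.Set (List Char)) (pref : List (List Char)) (l : List Char)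
    (hinv : rdiInv seen pref) (hcase : rdiIsImpA l = false ∨
      PySem.Set.contains seen (PySem.Chars.strip l) = true) :
    rdiInv seen (pref ++ [l]) := by
  intro k
  rw [hinv k, PySem.List.enumerate_append, List.find?_append,
    PySem.List.enumerate_cons, PySem.List.enumerate_nil]
  by_cases hb : rdiMatch k ((0 : Int) + pref.length, l) = true
  · have hk : PySem.Chars.strip l = k := by
      have := hb; simp [rdiMatch] at this; exact this.2
    have hcont : PySem.Set.contains seen (PySem.Chars.strip l) = true := by
      rcases hcase with hni | hcont
      · have : rdiIsImpKey (PySem.Chars.strip l) = true := by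
          have := hb; simp [rdiMatch] at this; exact this.1
        rw [← rdiIsImp_eq] at this
        rw [this] at hni; exact absurd hni (by simp)
      · exact hcont
    rw [List.find?_cons_of_pos hb, ← hk]
    exact iff_of_true ((hinv _).1 hcont) (by rw [Option.isSome_or]; simp)
  · rw [List.find?_cons_of_neg hb, List.find?_nil, Option.or_none]

theorem inv_snoc_add (seen : PySem.Set (List Char)) (pref : List (List Char)) (l : List Char)
    (hinv : rdiInv seen pref) (himp : rdiIsImpA l = true) :
    rdiInv (PySem.Set.add seen (PySem.Chars.strip l)) (pref ++ [l]) := by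
  intro k
  have himpk : rdiIsImpKey (PySem.Chars.strip l) = true := by rw [← rdiIsImp_eq]; exact himp
  have hc : PySem.Set.contains (PySem.Set.add seen (PySem.Chars.strip l)) k = true ↔
      (PySem.Set.contains seen k = true ∨ k = PySem.Chars.strip l) := by
    simp [PySem.Set.add, PySem.Set.contains]
    by_cases h : PySem.Chars.strip l ∈ seen
    · simp [h]; intro h2; rw [h2]; exact h
    · simp [h]
  rw [hc, PySem.List.enumerate_append, List.find?_append,
    PySem.List.enumerate_cons, PySem.List.enumerate_nil]
  by_cases hb : rdiMatch k ((0 : Int) + pref.length, l) = true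
  · have hk : k = PySem.Chars.strip l := by
      have := hb; simp [rdiMatch] at this; exact this.2.symm
    rw [List.find?_cons_of_pos hb]
    exact iff_of_true (Or.inr hk) (by rw [Option.isSome_or]; simp)
  · have hk : ¬ k = PySem.Chars.strip l := by
      intro h
      exact hb (by simp [rdiMatch, himpk, h])
    rw [List.find?_cons_of_neg hb, List.find?_nil, Option.or_none, hinv k]
    simp [hk]

-- main invariant induction: A's recursive keep = B's filter over the enumerated suffix
theorem main_eq (lines : List (List Char)) (ls : List (List Char)) :
    ∀ (pref : List (List Char)) (seen : PySem.Set (List Char)),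
    lines = pref ++ ls → rdiInv seen pref →
    rdiKeepA seen ls =
      ((PySem.List.enumerate ls (pref.length : Int)).filter
        (fun p => !(rdiIsImpKey (PySem.Chars.strip p.2)) ||
          (((PySem.List.enumerate lines 0).foldl rdiStepB PySem.Dict.empty).get?
              (PySem.Chars.strip p.2) == some p.1))).map (·.2) := by
  induction ls with
  | nil => intro pref seen _ _; simp [rdiKeepA, PySem.List.enumerate_nil]
  | cons l ls ih =>
    intro pref seen hsplit hinv
    have hget : ∀ k, ((PySem.List.enumerate lines 0).foldl rdiStepB PySem.Dict.empty).get? k =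
        ((PySem.List.enumerate lines 0).find? (rdiMatch k)).map (·.1) := by
      intro k; rw [dictB_get?]; simp
    have hfull : PySem.List.enumerate lines 0 =
        PySem.List.enumerate pref 0 ++
          PySem.List.enumerate (l :: ls) (pref.length : Int) := by
      rw [hsplit, PySem.List.enumerate_append]; norm_num
    have hlen' : (((pref ++ [l]).length : Int)) = (pref.length : Int) + 1 := by
      simp
    have hsplit' : lines = (pref ++ [l]) ++ ls := by simp [hsplit]
    rw [PySem.List.enumerate_cons]
    by_cases h1 : rdiIsImpA l = true
    · have himpk : rdiIsImpKey (PySem.Chars.strip l) = true := by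
        rw [← rdiIsImp_eq]; exact h1
      by_cases h2 : PySem.Set.contains seen (PySem.Chars.strip l) = true
      · -- duplicate import: A skips; B's dict maps the key to an earlier index
        rcases Option.isSome_iff_exists.1 ((hinv _).1 h2) with ⟨q, hq⟩
        have hqlt : q.1 < (pref.length : Int) :=
          enum_fst_lt (List.mem_of_find?_eq_some hq)
        have hfind : (PySem.List.enumerate lines 0).find? (rdiMatch (PySem.Chars.strip l))
            = some q := by
          rw [hfull, List.find?_append, hq]; rfl
        have hP : (!(rdiIsImpKey (PySem.Chars.strip l)) ||
            (((PySem.List.enumerate lines 0).foldl rdiStepB PySem.Dict.empty).get?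
                (PySem.Chars.strip l) == some ((pref.length : Int)))) = false := by
          rw [hget, hfind, himpk]
          simp
          omega
        simp only [rdiKeepA, h1, h2, if_pos, List.filter_cons]
        rw [hP]
        rw [← hlen']
        exact ih (pref ++ [l]) seen hsplit' (inv_snoc seen pref l hinv (Or.inr h2))
      · -- first occurrence: A keeps and records; B's dict maps the key to this index
        have hnone : (PySem.List.enumerate pref 0).find? (rdiMatch (PySem.Chars.strip l))
            = none := by
          cases hf : (PySem.List.enumerate pref 0).find? (rdiMatch (PySem.Chars.strip l)) with
          | none => rfl
          | some v => exact absurd ((hinv (PySem.Chars.strip l)).2 (by rw [hf]; rfl)) h2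
        have hmatch : rdiMatch (PySem.Chars.strip l) ((pref.length : Int), l) = true := by
          simp [rdiMatch, himpk]
        have hfind : (PySem.List.enumerate lines 0).find? (rdiMatch (PySem.Chars.strip l))
            = some ((pref.length : Int), l) := by
          rw [hfull, List.find?_append, hnone, PySem.List.enumerate_cons,
            List.find?_cons, hmatch]
          rfl
        have hP : (!(rdiIsImpKey (PySem.Chars.strip l)) ||
            (((PySem.List.enumerate lines 0).foldl rdiStepB PySem.Dict.empty).get?
                (PySem.Chars.strip l) == some ((pref.length : Int)))) = true := by
          rw [hget, hfind]
          simp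
        simp only [rdiKeepA, List.filter_cons]
        rw [if_pos h1, if_neg h2, hP, if_pos rfl, List.map_cons]
        rw [← hlen']
        rw [ih (pref ++ [l]) _ hsplit' (inv_snoc_add seen pref l hinv h1)]
    · -- not an import line: both keep it unconditionally
      have himpk : rdiIsImpKey (PySem.Chars.strip l) = false := by
        rw [← rdiIsImp_eq]; simpa using h1
      have hP : (!(rdiIsImpKey (PySem.Chars.strip l)) ||
          (((PySem.List.enumerate lines 0).foldl rdiStepB PySem.Dict.empty).get?
              (PySem.Chars.strip l) == some ((pref.length : Int)))) = true := by
        rw [himpk]; rfl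
      simp only [rdiKeepA, List.filter_cons]
      rw [if_neg h1, hP, if_pos rfl, List.map_cons]
      rw [← hlen']
      rw [ih (pref ++ [l]) seen hsplit' (inv_snoc seen pref l hinv (Or.inl (by simpa using h1)))]

-- ===== VERDICT (by name: the statement is the Claim_ definition above) =====
theorem remove_duplicate_imports_py_spec : Claim_equal_remove_duplicate_imports_py := by
  intro content _
  show remove_duplicate_imports_py content = remove_duplicate_imports_py_alt content
  have key : ∀ lines : List (List Char),
      (lines.foldl rdiStepA (PySem.Set.empty, ([] : List (List Char)))).2 =
      ((PySem.List.enumerate lines 0).filter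
        (fun p => !(rdiIsImpKey (PySem.Chars.strip p.2)) ||
          (((PySem.List.enumerate lines 0).foldl rdiStepB PySem.Dict.empty).get?
              (PySem.Chars.strip p.2) == some p.1))).map (·.2) := by
    intro lines
    rw [foldA_eq lines PySem.Set.empty []]
    have h0 : rdiInv PySem.Set.empty ([] : List (List Char)) := by
      intro k
      constructor
      · intro h
        rw [show PySem.Set.contains PySem.Set.empty k = false from rfl] at h
        exact absurd h (by simp)
      · intro h
        exact absurd h (by simp [PySem.List.enumerate_nil])
    have hm := main_eq lines lines [] PySem.Set.empty rfl h0
    simpa using hm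
  simp only [remove_duplicate_imports_py, remove_duplicate_imports_py_alt]
  congr 1
  congr 1
  exact key (PySem.Chars.splitOn content.toList ['\n'])
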